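-- pv_equiv track=rewrite | github.com/oscar9231/Codewars | WeIrD StRiNg CaSe.py | to_weird_case
-- ===== SOURCE A (Python) =====
-- def to_weird_case(string):
--     words = string.split(' ')
--     j = 0
--     weird_word = ''
--     while j < len(words):
--         odd = ''
--         even = ''
--         weird = ''
--         i = 0
--         while i < len(words[j]):
--             if i == 0 or i % 2 == 0:          #even bit
--                 even += words[j][i]
--             else:
--                 odd += words[j][i]
--             i += 1
--         even = even.upper()
--         if len(even) == len(odd):
--             n = 0
--             while n < len(odd):
--                 weird += even[n] + odd[n]
--                 n += 1
--         elif len(even) > len(odd):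
--             n = 0
--             while n < len(odd):
--                 weird += even[n] + odd[n]
--                 n += 1
--             weird += even[-1]
--         else:
--             n = 0
--             while n < len(even):
--                 weird += even[n] + odd[n]
--                 n += 1
--             weird += odd[-1]
--         weird_word += weird + ' '
--         j += 1
--     return weird_word[:-1]
-- ===== SOURCE B (Python) =====
-- def to_weird_case(string):
--     return ' '.join(
--         ''.join(c.upper() if i % 2 == 0 else c for i, c in enumerate(word))
--         for word in string.split(' ')
--     )
-- ===== Notes on version B (the rewrite author's own statement) =====
-- stated objective: simpler
-- what changed: Replaced A's per-word split-into-even/odd-buffers plus three-branch reinterleave and trailing-separator trim by one enumerate pass per word (uppercase at even index) combined with a single join over the words; A's repeated string concatenation is quadratic, the join is linear.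
import Mathlib
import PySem

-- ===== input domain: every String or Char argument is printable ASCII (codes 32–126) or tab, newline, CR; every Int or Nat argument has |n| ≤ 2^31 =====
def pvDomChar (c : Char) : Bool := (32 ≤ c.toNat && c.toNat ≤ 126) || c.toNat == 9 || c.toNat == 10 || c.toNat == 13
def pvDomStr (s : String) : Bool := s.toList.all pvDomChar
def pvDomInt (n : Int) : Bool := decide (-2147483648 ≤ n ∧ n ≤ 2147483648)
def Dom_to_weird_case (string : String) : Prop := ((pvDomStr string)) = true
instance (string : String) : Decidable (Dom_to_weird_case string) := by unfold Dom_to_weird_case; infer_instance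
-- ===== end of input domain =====

-- B replaces A's split-into-even/odd-buffers-then-reinterleave-with-three-length-branches by a
-- single indexed pass per word joined with ' '.join (objective: simpler).

-- ===== PORT A =====
-- inner while: i over words[j], collecting even/odd-indexed chars into two buffers
def pvA_split (w : List Char) (i : Nat) (even odd : List Char) : List Char × List Char :=
  if i < w.length then
    if i == 0 || i % 2 == 0 then pvA_split w (i + 1) (even ++ [w.getD i ' ']) odd
    else pvA_split w (i + 1) even (odd ++ [w.getD i ' '])
  else (even, odd)
termination_by w.length - i

-- the three identical 'while n < …: weird += even[n] + odd[n]' loops (bound = the loop's limit)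
def pvA_inter (even odd : List Char) (bound n : Nat) (weird : List Char) : List Char :=
  if n < bound then pvA_inter even odd bound (n + 1) (weird ++ [even.getD n ' ', odd.getD n ' '])
  else weird
termination_by bound - n

-- one iteration of the outer while's body (even/odd split, upper, length branches; even[-1]/odd[-1] via pyGet?)
def pvA_word (w : List Char) : List Char :=
  let p := pvA_split w 0 [] []
  let even := PySem.Chars.upper p.1
  let odd := p.2
  if even.length = odd.length then pvA_inter even odd odd.length 0 []
  else if even.length > odd.length then
    pvA_inter even odd odd.length 0 [] ++ [(PySem.List.pyGet? even (-1)).getD ' ']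
  else
    pvA_inter even odd even.length 0 [] ++ [(PySem.List.pyGet? odd (-1)).getD ' ']

-- outer while: j over words, appending weird + ' '
def pvA_outer (words : List (List Char)) (j : Nat) (acc : List Char) : List Char :=
  if j < words.length then pvA_outer words (j + 1) (acc ++ pvA_word (words.getD j []) ++ [' '])
  else acc
termination_by words.length - j

def to_weird_case (string : String) : String :=
  String.mk (PySem.List.slice (pvA_outer (PySem.Chars.splitOn string.toList [' ']) 0 []) none (some (-1)))

-- ===== PORT B =====
def to_weird_case_alt (string : String) : String :=
  String.mk (PySem.Chars.join [' ']
    ((PySem.Chars.splitOn string.toList [' ']).map (fun w =>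
      (PySem.List.enumerate w 0).map (fun p =>
        if p.1 % 2 = 0 then PySem.Chars.upperChar p.2 else p.2))))

-- ===== PRECONDITION & SPEC =====
def Spec_to_weird_case (string : String) (out : String) : Prop := out = to_weird_case_alt string
instance (string : String) (out : String) : Decidable (Spec_to_weird_case string out) := by unfold Spec_to_weird_case; infer_instance

-- ===== CLAIM (what is proved, stated in full; the proofs are below) =====
def Claim_equal_to_weird_case : Prop := ∀ (string : String), Dom_to_weird_case string → Spec_to_weird_case string (to_weird_case string)

-- ===== LEMMAS AND PROOFS =====

-- chars at even / odd indices
mutual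
def pvEvens : List Char → List Char
  | [] => []
  | a :: t => a :: pvOdds t
def pvOdds : List Char → List Char
  | [] => []
  | _ :: t => pvEvens t
end

-- interleave, pairwise, stop at the shorter
def pvIlv : List Char → List Char → List Char
  | x :: xs, y :: ys => x :: y :: pvIlv xs ys
  | _, _ => []

-- interleave of (map upper e) with o, one leftover element kept
def pvZ : List Char → List Char → List Char
  | x :: xs, y :: ys => PySem.Chars.upperChar x :: y :: pvZ xs ys
  | x :: _, [] => [PySem.Chars.upperChar x]
  | [], y :: _ => [y]
  | [], [] => []

-- the common per-word value: uppercase every even-indexed char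
def pvW : List Char → List Char
  | [] => []
  | [a] => [PySem.Chars.upperChar a]
  | a :: b :: t => PySem.Chars.upperChar a :: b :: pvW t

theorem pvA_split_eq (n : Nat) : ∀ (w : List Char) (i : Nat) (e o : List Char), w.length - i = n →
    pvA_split w i e o =
      if i % 2 = 0 then (e ++ pvEvens (w.drop i), o ++ pvOdds (w.drop i))
      else (e ++ pvOdds (w.drop i), o ++ pvEvens (w.drop i)) := by
  induction n with
  | zero =>
    intro w i e o h
    have hi : ¬ i < w.length := by omega
    have hd : w.drop i = [] := List.drop_eq_nil_of_le (by omega)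
    rw [pvA_split, if_neg hi, hd]
    simp [pvEvens, pvOdds]
  | succ n ih =>
    intro w i e o h
    have hi : i < w.length := by omega
    have hd : w.drop i = w[i] :: w.drop (i + 1) := List.drop_eq_getElem_cons hi
    have hgd : w.getD i ' ' = w[i] := by simp [List.getD_eq_getElem?_getD, hi]
    by_cases hp : i % 2 = 0
    · have hb : (i == 0 || i % 2 == 0) = true := by simp [hp]
      rw [pvA_split, if_pos hi, hb, if_pos rfl, ih w (i + 1) _ _ (by omega), hgd,
        if_neg (by omega : ¬ (i + 1) % 2 = 0), if_pos hp, hd]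
      simp [pvEvens, pvOdds]
    · have hb : (i == 0 || i % 2 == 0) = false := by
        have : i ≠ 0 := by omega
        simp [this, hp]
      rw [pvA_split, if_pos hi, hb]
      simp only [Bool.false_eq_true, if_false]
      rw [ih w (i + 1) _ _ (by omega), hgd,
        if_pos (by omega : (i + 1) % 2 = 0), if_neg hp, hd]
      simp [pvEvens, pvOdds]

theorem pvA_inter_eq (n : Nat) : ∀ (e o : List Char) (m k : Nat) (acc : List Char), m - k = n →
    m ≤ e.length → m ≤ o.length →
    pvA_inter e o m k acc = acc ++ pvIlv ((e.drop k).take (m - k)) ((o.drop k).take (m - k)) := by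
  induction n with
  | zero =>
    intro e o m k acc h _ _
    have hk : ¬ k < m := by omega
    rw [pvA_inter, if_neg hk, h]
    simp [pvIlv]
  | succ n ih =>
    intro e o m k acc h he ho
    have hk : k < m := by omega
    have hke : k < e.length := by omega
    have hko : k < o.length := by omega
    rw [pvA_inter, if_pos hk, ih e o m (k + 1) _ (by omega) he ho]
    have h1 : m - k = (m - (k + 1)) + 1 := by omega
    rw [h1, List.drop_eq_getElem_cons hke, List.drop_eq_getElem_cons hko,
      List.take_succ_cons, List.take_succ_cons, pvIlv]
    simp [List.getD_eq_getElem?_getD, hke, hko]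

theorem pvEO_len : ∀ (w : List Char),
    (pvOdds w).length ≤ (pvEvens w).length ∧ (pvEvens w).length ≤ (pvOdds w).length + 1
  | [] => by simp [pvEvens, pvOdds]
  | [a] => by simp [pvEvens, pvOdds]
  | a :: b :: t => by
    have := pvEO_len t
    simp only [pvEvens, pvOdds, List.length_cons]
    omega

theorem pyGet?_concat_neg_one (l : List Char) (x : Char) :
    PySem.List.pyGet? (l ++ [x]) (-1) = some x := by
  simp [PySem.List.pyGet?, PySem.List.pyIdx?]

theorem pvIlv_eq_pvZ (o : List Char) : ∀ (e : List Char), e.length = o.length →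
    pvIlv (e.map PySem.Chars.upperChar) o = pvZ e o := by
  induction o with
  | nil => intro e h; rw [List.eq_nil_of_length_eq_zero h]; rfl
  | cons y ys ih =>
    intro e h
    match e with
    | a :: e' =>
      simp only [List.map_cons, pvIlv, pvZ]
      exact congrArg _ (congrArg _ (ih e' (by simpa using h)))

theorem pvIlv_concat_eq_pvZ (o : List Char) : ∀ (e : List Char) (x : Char), e.length = o.length →
    pvIlv (((e ++ [x]).map PySem.Chars.upperChar).take o.length) o ++ [PySem.Chars.upperChar x]
      = pvZ (e ++ [x]) o := by
  induction o with
  | nil =>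
    intro e x h
    rw [List.eq_nil_of_length_eq_zero h]
    rfl
  | cons y ys ih =>
    intro e x h
    match e with
    | a :: e' =>
      simp only [List.cons_append, List.map_cons, List.length_cons, List.take_succ_cons,
        pvIlv, pvZ, List.cons_append]
      exact congrArg _ (congrArg _ (ih e' x (by simpa using h)))

theorem pvA_word_eq_pvZ (w : List Char) : pvA_word w = pvZ (pvEvens w) (pvOdds w) := by
  have hsplit : pvA_split w 0 [] [] = (pvEvens w, pvOdds w) := by
    rw [pvA_split_eq w.length w 0 [] [] (by omega)]
    simp
  have hlen := pvEO_len w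
  unfold pvA_word
  rw [hsplit]
  set E := pvEvens w with hE
  set O := pvOdds w with hO
  clear_value E O
  simp only [PySem.Chars.upper, List.length_map]
  by_cases heq : E.length = O.length
  · rw [if_pos heq,
      pvA_inter_eq O.length (E.map PySem.Chars.upperChar) O O.length 0 [] (by omega)
        (by simp [heq]) (le_refl _)]
    simp only [List.drop_zero, Nat.sub_zero, List.nil_append]
    rw [List.take_of_length_le (by simp [heq]),
      show List.take O.length O = O from List.take_of_length_le (le_refl _)]
    exact pvIlv_eq_pvZ O E heq
  · have hgt : E.length = O.length + 1 := by omega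
    rw [if_neg heq, if_pos (by omega : E.length > O.length),
      pvA_inter_eq O.length (E.map PySem.Chars.upperChar) O O.length 0 [] (by omega)
        (by simp; omega) (le_refl _)]
    have hne : E ≠ [] := by intro h0; rw [h0] at hgt; simp at hgt
    obtain ⟨e', x, hEx⟩ := (List.eq_nil_or_concat E).resolve_left hne
    rw [List.concat_eq_append] at hEx
    subst hEx
    have he' : e'.length = O.length := by simp at hgt; omega
    simp only [List.drop_zero, Nat.sub_zero, List.nil_append]
    rw [show List.take O.length O = O from List.take_of_length_le (le_refl _),
      List.map_append]
    simp only [List.map_cons, List.map_nil]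
    rw [pyGet?_concat_neg_one]
    simp only [Option.getD_some]
    rw [show List.map PySem.Chars.upperChar e' ++ [PySem.Chars.upperChar x]
        = List.map PySem.Chars.upperChar (e' ++ [x]) from by simp]
    exact pvIlv_concat_eq_pvZ O e' x he'

theorem pvZ_eq_pvW : ∀ (w : List Char), pvZ (pvEvens w) (pvOdds w) = pvW w
  | [] => rfl
  | [a] => rfl
  | a :: b :: t => by
    simp only [pvEvens, pvOdds, pvZ, pvW]
    exact congrArg _ (congrArg _ (pvZ_eq_pvW t))

theorem pvB_word_eq_pvW : ∀ (w : List Char) (s : Int), s % 2 = 0 →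
    (PySem.List.enumerate w s).map
      (fun p => if p.1 % 2 = 0 then PySem.Chars.upperChar p.2 else p.2) = pvW w
  | [], s, _ => by simp [PySem.List.enumerate_nil, pvW]
  | [a], s, hs => by
    simp [PySem.List.enumerate_cons, PySem.List.enumerate_nil, pvW, hs]
  | a :: b :: t, s, hs => by
    rw [PySem.List.enumerate_cons, PySem.List.enumerate_cons]
    simp only [List.map_cons, pvW]
    rw [if_pos hs, if_neg (by omega), pvB_word_eq_pvW t (s + 1 + 1) (by omega)]

theorem pvA_outer_eq (n : Nat) : ∀ (words : List (List Char)) (j : Nat) (acc : List Char),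
    words.length - j = n →
    pvA_outer words j acc = acc ++ ((words.drop j).map (fun w => pvA_word w ++ [' '])).flatten := by
  induction n with
  | zero =>
    intro words j acc h
    have hj : ¬ j < words.length := by omega
    rw [pvA_outer, if_neg hj, List.drop_eq_nil_of_le (by omega)]
    simp
  | succ n ih =>
    intro words j acc h
    have hj : j < words.length := by omega
    rw [pvA_outer, if_pos hj, ih words (j + 1) _ (by omega),
      List.drop_eq_getElem_cons hj]
    have hg : words.getD j [] = words[j] := by simp [List.getD_eq_getElem?_getD, hj]
    rw [hg]
    simp only [List.map_cons, List.flatten_cons, List.append_assoc]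

theorem pv_dropLast_flatten_eq_join (f : List Char → List Char) : ∀ (ws : List (List Char)),
    ((ws.map (fun w => f w ++ [' '])).flatten).dropLast = PySem.Chars.join [' '] (ws.map f)
  | [] => by simp [PySem.Chars.join_nil]
  | [w] => by simp [PySem.Chars.join_singleton]
  | w :: v :: ws => by
    have hne : ((List.map (fun w => f w ++ [' ']) (v :: ws)).flatten) ≠ [] := by simp
    calc (((w :: v :: ws).map (fun w => f w ++ [' '])).flatten).dropLast
        = ((f w ++ [' ']) ++ ((List.map (fun w => f w ++ [' ']) (v :: ws)).flatten)).dropLast := by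
          simp [List.flatten_cons]
      _ = (f w ++ [' ']) ++ ((List.map (fun w => f w ++ [' ']) (v :: ws)).flatten).dropLast :=
          List.dropLast_append_of_ne_nil hne
      _ = (f w ++ [' ']) ++ PySem.Chars.join [' '] ((v :: ws).map f) := by
          rw [pv_dropLast_flatten_eq_join f (v :: ws)]
      _ = PySem.Chars.join [' '] ((w :: v :: ws).map f) := by
          simp only [List.map_cons, PySem.Chars.join_cons_cons, List.append_assoc]

theorem pv_slice_neg_one (l : List Char) :
    PySem.List.slice l none (some (-1)) = l.dropLast := by
  rcases l with _ | ⟨a, t⟩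
  · rfl
  · have h : (((a :: t).length : Int) + (-1)).toNat = t.length := by
      simp
    simp only [PySem.List.slice, PySem.List.clampIdx]
    rw [if_pos (by decide), if_neg (by simp only [List.length_cons]; push_cast; omega), h]
    simp [List.dropLast_eq_take]

-- ===== VERDICT (by name: the statement is the Claim_ definition above) =====
theorem to_weird_case_spec : Claim_equal_to_weird_case := by
  intro s _
  unfold Spec_to_weird_case to_weird_case to_weird_case_alt
  rw [pvA_outer_eq (PySem.Chars.splitOn s.toList [' ']).length _ 0 [] (by omega)]
  simp only [List.drop_zero, List.nil_append]
  rw [pv_slice_neg_one, pv_dropLast_flatten_eq_join]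
  congr 1
  apply congrArg
  apply List.map_congr_left
  intro w _
  rw [pvA_word_eq_pvZ, pvZ_eq_pvW, ← pvB_word_eq_pvW w 0 (by decide)]
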